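-- pv_equiv track=rewrite | github.com/PLCwithoutP/OpenFOAM_Pre_and_Post_processing | meshImporter.py | checkDataType
-- ===== SOURCE A (Python) =====
-- def checkDataType(content):
--     for line in content:
--         if ("points;" in line):
--             dataType = 0
--         if ("faces;" in line):
--             dataType = 1
--         if ("owner;" in line):
--             dataType = 2
--         if ("neighbour;" in line):
--             dataType = 3
--         if ("boundary;" in line):
--             dataType = 4
--     return dataType
-- ===== SOURCE B (Python) =====
-- def checkDataType(content):
--     keywords = ((4, "boundary;"), (3, "neighbour;"), (2, "owner;"), (1, "faces;"), (0, "points;"))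
--     for line in reversed(list(content)):
--         for dataType, keyword in keywords:
--             if keyword in line:
--                 return dataType
--     raise ValueError("no mesh data keyword found in content")
-- ===== Notes on version B (the rewrite author's own statement) =====
-- stated objective: alternative
-- what changed: B scans the lines in reverse and returns at the first line containing any keyword, testing keywords from highest priority down, instead of A's full forward pass that re-tests all five keywords on every line and overwrites the result at each match; Pre_ excludes inputs where no line contains any keyword, on which A raises UnboundLocalError (B raises ValueError).
import Mathlib
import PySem

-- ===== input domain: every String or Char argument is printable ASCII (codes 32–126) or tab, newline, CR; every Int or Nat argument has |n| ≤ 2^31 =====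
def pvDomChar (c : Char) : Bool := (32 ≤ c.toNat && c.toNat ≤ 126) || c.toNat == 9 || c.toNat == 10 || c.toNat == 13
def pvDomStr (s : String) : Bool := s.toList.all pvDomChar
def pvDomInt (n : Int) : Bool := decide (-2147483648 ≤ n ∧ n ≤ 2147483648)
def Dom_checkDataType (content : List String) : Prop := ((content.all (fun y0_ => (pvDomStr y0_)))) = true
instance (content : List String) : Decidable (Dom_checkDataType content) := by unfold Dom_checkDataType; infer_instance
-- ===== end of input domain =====

-- B replaces A's forward overwrite-every-match pass by a reverse scan with an early exit
-- at the last matching line (objective: alternative traversal, same worst-case cost).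

-- ===== PORT A =====
-- dataType is possibly-unassigned; modelled as Option Int, final read raises outside Pre_
-- (there the port returns an unclaimed default 0).
def pvStepA (st : Option Int) (line : String) : Option Int :=
  let st := if PySem.Str.isIn "points;" line then some 0 else st
  let st := if PySem.Str.isIn "faces;" line then some 1 else st
  let st := if PySem.Str.isIn "owner;" line then some 2 else st
  let st := if PySem.Str.isIn "neighbour;" line then some 3 else st
  let st := if PySem.Str.isIn "boundary;" line then some 4 else st
  st

def checkDataType (content : List String) : Int :=
  (content.foldl pvStepA none).getD 0

-- ===== PORT B =====
-- inner early-exit loop over the priority table, high to low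
def pvClassifyB (line : String) : Option Int :=
  if PySem.Str.isIn "boundary;" line then some 4
  else if PySem.Str.isIn "neighbour;" line then some 3
  else if PySem.Str.isIn "owner;" line then some 2
  else if PySem.Str.isIn "faces;" line then some 1
  else if PySem.Str.isIn "points;" line then some 0
  else none

-- outer loop over reversed(lines), returning at the first line with a keyword;
-- the no-match fall-through (a ValueError in Source B) is outside Pre_ and returns default 0.
def pvGoB : List String → Option Int
  | [] => none
  | l :: ls => match pvClassifyB l with
    | some v => some v
    | none => pvGoB ls

def checkDataType_alt (content : List String) : Int :=
  (pvGoB content.reverse).getD 0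

-- ===== PRECONDITION & SPEC =====
-- Pre_ excludes exactly the inputs where no line contains any of the five keywords:
-- there Python A raises UnboundLocalError (and B raises ValueError), no int is returned.
def Pre_checkDataType (content : List String) : Prop :=
  (content.any (fun l =>
    PySem.Str.isIn "points;" l || PySem.Str.isIn "faces;" l || PySem.Str.isIn "owner;" l ||
    PySem.Str.isIn "neighbour;" l || PySem.Str.isIn "boundary;" l)) = true
instance (content : List String) : Decidable (Pre_checkDataType content) := by
  unfold Pre_checkDataType; infer_instance

def pvWitness_checkDataType : List String := ["FoamFile", "    owner;"]

def Spec_checkDataType (content : List String) (out : Int) : Prop := out = checkDataType_alt content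
instance (content : List String) (out : Int) : Decidable (Spec_checkDataType content out) := by
  unfold Spec_checkDataType; infer_instance

-- ===== CLAIM (what is proved, stated in full; the proofs are below) =====
def Claim_equal_checkDataType : Prop := ∀ (content : List String), Dom_checkDataType content → Pre_checkDataType content → Spec_checkDataType content (checkDataType content)

-- ===== LEMMAS AND PROOFS =====

theorem pvStepA_eq (st : Option Int) (l : String) :
    pvStepA st l = match pvClassifyB l with | some v => some v | none => st := by
  unfold pvStepA pvClassifyB
  cases hb : PySem.Str.isIn "boundary;" l <;>
    cases hn : PySem.Str.isIn "neighbour;" l <;>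
      cases ho : PySem.Str.isIn "owner;" l <;>
        cases hf : PySem.Str.isIn "faces;" l <;>
          cases hp : PySem.Str.isIn "points;" l <;> simp

theorem pvGoB_append (as bs : List String) :
    pvGoB (as ++ bs) = match pvGoB as with | some v => some v | none => pvGoB bs := by
  induction as with
  | nil => simp [pvGoB]
  | cons a as ih =>
    simp only [List.cons_append, pvGoB, ih]
    cases pvClassifyB a <;> simp

theorem foldl_stepA_eq (content : List String) (st : Option Int) :
    content.foldl pvStepA st =
      match pvGoB content.reverse with | some v => some v | none => st := by
  induction content generalizing st with
  | nil => simp [pvGoB]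
  | cons x xs ih =>
    rw [List.foldl_cons, ih, List.reverse_cons, pvGoB_append]
    cases h : pvGoB xs.reverse <;> simp only [pvGoB, pvStepA_eq] <;> cases pvClassifyB x <;> simp

-- ===== VERDICT (by name: the statement is the Claim_ definition above) =====
theorem checkDataType_spec : Claim_equal_checkDataType := by
  intro content _ _
  unfold Spec_checkDataType checkDataType checkDataType_alt
  rw [foldl_stepA_eq]
  cases pvGoB content.reverse <;> simp
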